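-- pv_equiv track=rewrite | github.com/keep-starknet-strange/garaga | tests/python_tests/casting_out_primes.py | pi_b_mod_q_mod_m
-- ===== SOURCE A (Python) =====
-- q = 21888242871839275222246405745257275088696311157297823662689037894645226208583
--
-- n = 3 # number of limbs
--
-- n_pi = 2*n - 1 # number of limbs in polynomial product
--
-- b = 2**86 # base
--
-- def pi_b_mod_q_mod_m(x, y, m):
--     assert len(x) == len(y) == n, "Error: pi_b() requires two lists of length n"
--     limbs = n_pi*[0]
--     result = 0
--     for i in range(n):
--         for j in range(n):
--             limbs[i+j] += x[i]*y[j]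
--             result += x[i]*y[j] * ((b**(i+j)%q)%m)
--     assert 0 <= result < n**2*m*b**2
--     return limbs, result
-- ===== SOURCE B (Python) =====
-- q = 21888242871839275222246405745257275088696311157297823662689037894645226208583
--
-- n = 3
--
-- n_pi = 2*n - 1
--
-- b = 2**86
--
-- def pi_b_mod_q_mod_m(x, y, m):
--     assert len(x) == len(y) == n, "Error: pi_b() requires two lists of length n"
--     # stage 1: convolution limbs, one diagonal per output index k
--     limbs = [sum(x[i] * y[k - i] for i in range(max(0, k - n + 1), min(k, n - 1) + 1))
--              for k in range(n_pi)]
--     # stage 2: single weighted pass over the limbs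
--     result = sum(l * ((b**k % q) % m) for k, l in enumerate(limbs))
--     assert 0 <= result < n**2*m*b**2
--     return limbs, result
-- ===== Notes on version B (the rewrite author's own statement) =====
-- stated objective: alternative
-- what changed: Replaced A's single interleaved n×n double loop (mutating limbs and accumulating result together) by two separately-shaped passes: a per-diagonal convolution pass that builds each limb k as sum(x[i]*y[k-i]), then one linear weighted pass computing result from the finished limbs.
import Mathlib
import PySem

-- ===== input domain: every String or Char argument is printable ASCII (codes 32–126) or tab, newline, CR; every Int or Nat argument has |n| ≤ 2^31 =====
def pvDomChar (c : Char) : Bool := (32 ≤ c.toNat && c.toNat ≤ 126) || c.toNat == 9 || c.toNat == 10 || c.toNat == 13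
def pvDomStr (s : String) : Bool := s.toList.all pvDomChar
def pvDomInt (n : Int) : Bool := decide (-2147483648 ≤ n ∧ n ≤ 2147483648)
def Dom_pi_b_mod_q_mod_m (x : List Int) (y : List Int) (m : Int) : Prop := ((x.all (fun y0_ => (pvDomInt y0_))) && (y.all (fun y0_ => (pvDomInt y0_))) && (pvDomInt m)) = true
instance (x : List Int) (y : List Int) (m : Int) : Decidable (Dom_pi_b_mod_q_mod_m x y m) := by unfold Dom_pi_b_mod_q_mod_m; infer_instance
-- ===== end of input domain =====

-- B computes the same limbs and result in two separate passes (one per diagonal, then one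
-- linear weighted sum) instead of A's single interleaved n×n double loop; objective: alternative.

-- module constants shared by both Pythons
def pyq : Int := 21888242871839275222246405745257275088696311157297823662689037894645226208583
def pyb : Int := 2 ^ 86

-- ===== PORT A =====
-- A: one n×n double loop, accumulating limbs (in-place update) and result together.
def pi_b_mod_q_mod_m (x : List Int) (y : List Int) (m : Int) : List Int × Int :=
  (List.range 3).foldl (fun st i =>
    (List.range 3).foldl (fun st j =>
      (st.1.set (i + j) (st.1.getD (i + j) 0 + x.getD i 0 * y.getD j 0),
       st.2 + x.getD i 0 * y.getD j 0 * PySem.Int.mod (PySem.Int.mod (pyb ^ (i + j)) pyq) m)) st)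
    (List.replicate 5 0, 0)

-- ===== PORT B =====
-- B: stage 1 builds each limb k as the sum over its diagonal i ∈ [max(0,k-2), min(k,2)]
-- (Nat subtraction k-2 equals Python's max(0, k-n+1)); stage 2 is one weighted pass.
def pi_b_mod_q_mod_m_alt (x : List Int) (y : List Int) (m : Int) : List Int × Int :=
  let limbs := (List.range 5).map (fun k =>
    (List.range' (k - 2) (min k 2 + 1 - (k - 2))).foldl
      (fun s i => s + x.getD i 0 * y.getD (k - i) 0) 0)
  let result := (PySem.List.enumerate limbs).foldl
    (fun s kl => s + kl.2 * PySem.Int.mod (PySem.Int.mod (pyb ^ kl.1.toNat) pyq) m) 0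
  (limbs, result)

-- ===== PRECONDITION & SPEC =====
-- Pre_ excludes exactly the inputs where A raises: the length assert (lists not of length 3),
-- ZeroDivisionError at m = 0, and the final range assert on the weighted sum (written here as
-- a closed arithmetic formula over the six entries; B raises at the same inputs).
def Pre_pi_b_mod_q_mod_m (x : List Int) (y : List Int) (m : Int) : Prop :=
  x.length = 3 ∧ y.length = 3 ∧ m ≠ 0 ∧
  (let w : Nat → Int := fun k => PySem.Int.mod (PySem.Int.mod (pyb ^ k) pyq) m
   let s : Int :=
     (x.getD 0 0 * y.getD 0 0) * w 0 +
     (x.getD 0 0 * y.getD 1 0 + x.getD 1 0 * y.getD 0 0) * w 1 +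
     (x.getD 0 0 * y.getD 2 0 + x.getD 1 0 * y.getD 1 0 + x.getD 2 0 * y.getD 0 0) * w 2 +
     (x.getD 1 0 * y.getD 2 0 + x.getD 2 0 * y.getD 1 0) * w 3 +
     (x.getD 2 0 * y.getD 2 0) * w 4
   0 ≤ s ∧ s < 9 * m * pyb ^ 2)
instance (x : List Int) (y : List Int) (m : Int) : Decidable (Pre_pi_b_mod_q_mod_m x y m) := by
  unfold Pre_pi_b_mod_q_mod_m; infer_instance
def pvWitness_pi_b_mod_q_mod_m : List Int × List Int × Int := ([1, 2, 3], [4, 5, 6], 7)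
def Spec_pi_b_mod_q_mod_m (x : List Int) (y : List Int) (m : Int) (out : List Int × Int) : Prop := out = pi_b_mod_q_mod_m_alt x y m
instance (x : List Int) (y : List Int) (m : Int) (out : List Int × Int) : Decidable (Spec_pi_b_mod_q_mod_m x y m out) := by unfold Spec_pi_b_mod_q_mod_m; infer_instance

-- ===== CLAIM (what is proved, stated in full; the proofs are below) =====
def Claim_equal_pi_b_mod_q_mod_m : Prop := ∀ (x : List Int) (y : List Int) (m : Int), Dom_pi_b_mod_q_mod_m x y m → Pre_pi_b_mod_q_mod_m x y m → Spec_pi_b_mod_q_mod_m x y m (pi_b_mod_q_mod_m x y m)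

-- ===== LEMMAS AND PROOFS =====
theorem pi_b_eq_of_len (a0 a1 a2 b0 b1 b2 m : Int) :
    pi_b_mod_q_mod_m [a0, a1, a2] [b0, b1, b2] m
      = pi_b_mod_q_mod_m_alt [a0, a1, a2] [b0, b1, b2] m := by
  simp [pi_b_mod_q_mod_m, pi_b_mod_q_mod_m_alt, List.range_succ, List.range',
    PySem.List.enumerate, List.getD, List.set]
  ring

-- ===== VERDICT (by name: the statement is the Claim_ definition above) =====
theorem pi_b_mod_q_mod_m_spec : Claim_equal_pi_b_mod_q_mod_m := by
  intro x y m _ hpre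
  obtain ⟨hx, hy, -, -⟩ := hpre
  match x, hx, y, hy with
  | [a0, a1, a2], _, [b0, b1, b2], _ =>
    exact pi_b_eq_of_len a0 a1 a2 b0 b1 b2 m
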